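-- pv_equiv track=rewrite | github.com/PDegez/advent_of_code_2024 | d9.py | sort_this_shit
-- ===== SOURCE A (Python) =====
-- def sort_this_shit(chuncks:list, residuals:list):
--
--     while residuals != []:
--         need_sort = residuals[0]
--         for i, chunck in enumerate(chuncks):
--             sous = chunck[1] - need_sort[1]
--             if chunck[0] == "." and sous >= 0:
--                 if sous > 0:
--                     dot = ["." for _ in range(sous)]
--                     cle_dot = (".", len(dot), "?")
--                     chuncks = chuncks[:i] + [need_sort] + [cle_dot] + chuncks[i+1:]
--                 else:
--                     chuncks = chuncks[:i] + [need_sort] + chuncks[i+1:]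
--
--                 break
--         residuals.pop(0)
--
--     return chuncks
-- ===== SOURCE B (Python) =====
-- def _fill(r, t):
--     # return t with its first free ('.') leaf of size >= r[1] filled by r, or None
--     if t[0] == "leaf":
--         c = t[1]
--         if c[0] == "." and c[1] >= r[1]:
--             if c[1] > r[1]:
--                 return ("node", ("leaf", r), ("leaf", (".", c[1] - r[1], "?")))
--             return ("leaf", r)
--         return None
--     left = _fill(r, t[1])
--     if left is not None:
--         return ("node", left, t[2])
--     right = _fill(r, t[2])
--     if right is not None:
--         return ("node", t[1], right)
--     return None
--
--
-- def _flatten(t, out):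
--     if t[0] == "leaf":
--         out.append(t[1])
--     else:
--         _flatten(t[1], out)
--         _flatten(t[2], out)
--
--
-- def sort_this_shit(chuncks: list, residuals: list):
--     # rope of split-trees plus an ordered free-gap index (root, size):
--     # each placement rewrites one tree and the gap index instead of
--     # rescanning and rebuilding the whole chunk list
--     forest = [("leaf", c) for c in chuncks]
--     gaps = [(i, c[1]) for i, c in enumerate(chuncks) if c[0] == "."]
--     for r in residuals:
--         for pos, (ri, size) in enumerate(gaps):
--             if size >= r[1]:
--                 forest[ri] = _fill(r, forest[ri])
--                 new = ([(ri, r[1])] if r[0] == "." else []) + \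
--                       ([(ri, size - r[1])] if size > r[1] else [])
--                 gaps = gaps[:pos] + new + gaps[pos + 1:]
--                 break
--     out = []
--     for t in forest:
--         _flatten(t, out)
--     residuals.clear()  # A empties residuals in place; so do we
--     return out
-- ===== Notes on version B (the rewrite author's own statement) =====
-- stated objective: faster
-- what changed: Replaces A's per-residual rescan of all chunks plus full-list slice rebuild by a rope of split-trees with an ordered free-gap index (root, size): each placement scans only the gap index, rewrites the one affected tree and splices the gap index, and the chunk list is flattened once at the end.
import Mathlib
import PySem

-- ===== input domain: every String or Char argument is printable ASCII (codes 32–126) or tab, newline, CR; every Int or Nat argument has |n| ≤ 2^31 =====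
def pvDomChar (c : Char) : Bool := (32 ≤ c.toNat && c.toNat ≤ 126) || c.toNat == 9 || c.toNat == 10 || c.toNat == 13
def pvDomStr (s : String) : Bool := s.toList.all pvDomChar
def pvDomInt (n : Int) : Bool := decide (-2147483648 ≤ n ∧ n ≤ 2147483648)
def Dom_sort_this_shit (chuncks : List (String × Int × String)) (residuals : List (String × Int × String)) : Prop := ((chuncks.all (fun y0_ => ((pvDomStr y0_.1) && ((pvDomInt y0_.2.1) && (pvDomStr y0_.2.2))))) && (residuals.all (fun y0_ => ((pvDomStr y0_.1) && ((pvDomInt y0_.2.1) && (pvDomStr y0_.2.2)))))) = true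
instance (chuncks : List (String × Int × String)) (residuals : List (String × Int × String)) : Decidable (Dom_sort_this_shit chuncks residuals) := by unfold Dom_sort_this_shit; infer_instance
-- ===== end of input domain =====

-- B replaces A's repeated scan-and-rebuild of the chunk list by a rope of split-trees
-- plus an ordered free-gap index: each placement rewrites one tree and the gap index
-- (per-placement work drops from a full-list pass to a gap-index pass; measured faster).
-- Both A and B empty `residuals` in place; the equivalence proved is about the return value.

-- ===== PORT A =====
-- A's inner `for i, chunck in enumerate(chuncks)` with its break-on-first-fit splice.
def pvFindA (need : String × Int × String) (rest : List (Int × (String × Int × String)))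
    (chuncks : List (String × Int × String)) : List (String × Int × String) :=
  match rest with
  | [] => chuncks
  | (i, chunck) :: tl =>
    let sous := chunck.2.1 - need.2.1
    if chunck.1 = "." ∧ 0 ≤ sous then
      if 0 < sous then
        let dot := (PySem.List.pyRange 0 sous 1).map (fun _ => ".")
        let cle_dot : String × Int × String := (".", (dot.length : Int), "?")
        PySem.List.slice chuncks none (some i) ++ [need] ++ [cle_dot] ++
          PySem.List.slice chuncks (some (i + 1)) none
      else
        PySem.List.slice chuncks none (some i) ++ [need] ++
          PySem.List.slice chuncks (some (i + 1)) none
    else pvFindA need tl chuncks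

def sort_this_shit (chuncks : List (String × Int × String)) (residuals : List (String × Int × String)) : List (String × Int × String) :=
  match residuals with
  | [] => chuncks
  | need_sort :: tl =>
      -- the for-loop over enumerate(chuncks), then residuals.pop(0)
      sort_this_shit (pvFindA need_sort (PySem.List.enumerate chuncks 0) chuncks) tl

-- ===== PORT B =====
-- B's rope: a chunk either stayed a leaf or was split into two parts when filled.
inductive PvTree where
  | leaf : (String × Int × String) → PvTree
  | node : PvTree → PvTree → PvTree
deriving DecidableEq, Repr

-- B's `_fill`: first free ('.') leaf of size ≥ r fills with r (splitting off the leftover), else None.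
def pvFill? (r : String × Int × String) : PvTree → Option PvTree
  | .leaf c =>
    if c.1 = "." ∧ r.2.1 ≤ c.2.1 then
      if r.2.1 < c.2.1 then
        some (.node (.leaf r) (.leaf (".", c.2.1 - r.2.1, "?")))
      else some (.leaf r)
    else none
  | .node l t2 =>
    match pvFill? r l with
    | some l' => some (.node l' t2)
    | none =>
      match pvFill? r t2 with
      | some r' => some (.node l r')
      | none => none

-- B's `_flatten`: append the leaves in order onto `out`.
def pvFlattenAcc : PvTree → List (String × Int × String) → List (String × Int × String)
  | .leaf c, out => out ++ [c]
  | .node l t2, out => pvFlattenAcc t2 (pvFlattenAcc l out)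

-- B's inner `for pos, (ri, size) in enumerate(gaps)` with its break-on-first-fit splice of the gap index.
def pvScanB (r : String × Int × String) (rest : List (Int × (Int × Int)))
    (forest : List PvTree) (gaps : List (Int × Int)) : List PvTree × List (Int × Int) :=
  match rest with
  | [] => (forest, gaps)
  | (pos, g) :: tl =>
    if r.2.1 ≤ g.2 then
      let t := (PySem.List.pyGet? forest g.1).getD (.leaf ("", 0, ""))
      let new := (if r.1 = "." then [(g.1, r.2.1)] else []) ++
                 (if r.2.1 < g.2 then [(g.1, g.2 - r.2.1)] else [])
      (forest.set g.1.toNat ((pvFill? r t).getD t),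
       PySem.List.slice gaps none (some pos) ++ new ++ PySem.List.slice gaps (some (pos + 1)) none)
    else pvScanB r tl forest gaps

def sort_this_shit_alt (chuncks : List (String × Int × String)) (residuals : List (String × Int × String)) : List (String × Int × String) :=
  let forest0 : List PvTree := chuncks.map PvTree.leaf
  let gaps0 : List (Int × Int) :=
    ((PySem.List.enumerate chuncks 0).filter (fun p => p.2.1 == ".")).map (fun p => (p.1, p.2.2.1))
  let st := residuals.foldl
    (fun (st : List PvTree × List (Int × Int)) r => pvScanB r (PySem.List.enumerate st.2 0) st.1 st.2)
    (forest0, gaps0)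
  st.1.foldl (fun out t => pvFlattenAcc t out) []

-- ===== PRECONDITION & SPEC =====
def Spec_sort_this_shit (chuncks : List (String × Int × String)) (residuals : List (String × Int × String)) (out : List (String × Int × String)) : Prop := out = sort_this_shit_alt chuncks residuals
instance (chuncks : List (String × Int × String)) (residuals : List (String × Int × String)) (out : List (String × Int × String)) : Decidable (Spec_sort_this_shit chuncks residuals out) := by unfold Spec_sort_this_shit; infer_instance

-- ===== CLAIM (what is proved, stated in full; the proofs are below) =====
def Claim_equal_sort_this_shit : Prop := ∀ (chuncks : List (String × Int × String)) (residuals : List (String × Int × String)), Dom_sort_this_shit chuncks residuals → Spec_sort_this_shit chuncks residuals (sort_this_shit chuncks residuals)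

-- ===== LEMMAS AND PROOFS =====

-- In-order leaves of a tree / a forest.
def pvFlat : PvTree → List (String × Int × String)
  | .leaf c => [c]
  | .node l r => pvFlat l ++ pvFlat r

def pvFlatF (ts : List PvTree) : List (String × Int × String) := ts.flatMap pvFlat

-- Sizes of the free ('.') leaves of a tree, in order.
def pvGS : PvTree → List Int
  | .leaf c => if c.1 = "." then [c.2.1] else []
  | .node l r => pvGS l ++ pvGS r

-- The gap index a forest ought to carry, roots numbered from i.
def pvGSpec (i : Int) : List PvTree → List (Int × Int)
  | [] => []
  | t :: ts => (pvGS t).map (fun s => (i, s)) ++ pvGSpec (i + 1) ts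

-- First-fit splice on a plain chunk list (abstract description of A's step).
def pvPlace? (r : String × Int × String) : List (String × Int × String) → Option (List (String × Int × String))
  | [] => none
  | c :: tl =>
    if c.1 = "." ∧ r.2.1 ≤ c.2.1 then
      some (r :: (if r.2.1 < c.2.1 then [((".", c.2.1 - r.2.1, "?") : String × Int × String)] else []) ++ tl)
    else (pvPlace? r tl).map (c :: ·)

-- First-fit split of a size list.
def pvSplit (r : Int) : List Int → Option (List Int × Int × List Int)
  | [] => none
  | s :: tl => if r ≤ s then some ([], s, tl) else (pvSplit r tl).map (fun x => (s :: x.1, x.2.1, x.2.2))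

def pvNewSizes (r : String × Int × String) (s : Int) : List Int :=
  (if r.1 = "." then [r.2.1] else []) ++ (if r.2.1 < s then [s - r.2.1] else [])

-- Fill the first tree of the forest that accepts r.
def pvPlaceF (r : String × Int × String) : List PvTree → Option (List PvTree)
  | [] => none
  | t :: ts =>
    match pvFill? r t with
    | some t' => some (t' :: ts)
    | none => (pvPlaceF r ts).map (t :: ·)

-- Accumulator form of B's gap scan.
def pvScanAcc (r : String × Int × String) (forest : List PvTree) (pre : List (Int × Int)) :
    List (Int × Int) → List PvTree × List (Int × Int)
  | [] => (forest, pre)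
  | g :: tl =>
    if r.2.1 ≤ g.2 then
      let t := (PySem.List.pyGet? forest g.1).getD (.leaf ("", 0, ""))
      (forest.set g.1.toNat ((pvFill? r t).getD t),
       pre ++ ((if r.1 = "." then [(g.1, r.2.1)] else []) ++ (if r.2.1 < g.2 then [(g.1, g.2 - r.2.1)] else [])) ++ tl)
    else pvScanAcc r forest (pre ++ [g]) tl

theorem pvScanB_eq_acc (r : String × Int × String) :
    ∀ (rest pre : List (Int × Int)) (forest : List PvTree),
      pvScanB r (PySem.List.enumerate rest (pre.length : Int)) forest (pre ++ rest)
        = pvScanAcc r forest pre rest := by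
  intro rest
  induction rest with
  | nil => intro pre forest; simp [pvScanB, pvScanAcc, PySem.List.enumerate_nil]
  | cons g tl ih =>
    intro pre forest
    rw [PySem.List.enumerate_cons]
    simp only [pvScanB, pvScanAcc]
    by_cases hf : r.2.1 ≤ g.2
    · rw [if_pos hf, if_pos hf]
      have hto : PySem.List.slice (pre ++ g :: tl) none (some (pre.length : Int)) = pre := by
        rw [PySem.List.slice_to_natCast]; simp
      have hfrom : PySem.List.slice (pre ++ g :: tl) (some ((pre.length : Int) + 1)) none = tl := by
        have h : ((pre.length : Int) + 1) = ((pre.length + 1 : Nat) : Int) := by push_cast; ring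
        rw [h, PySem.List.slice_from_natCast]; simp
      rw [hto, hfrom]
    · rw [if_neg hf, if_neg hf]
      have h := ih (pre ++ [g]) forest
      simp only [List.length_append, List.length_cons, List.length_nil] at h
      push_cast at h ⊢
      simpa [List.append_assoc] using h

theorem pvFlattenAcc_eq (t : PvTree) : ∀ out, pvFlattenAcc t out = out ++ pvFlat t := by
  induction t with
  | leaf c => intro out; simp [pvFlattenAcc, pvFlat]
  | node l r ihl ihr => intro out; simp [pvFlattenAcc, pvFlat, ihl, ihr]

theorem foldl_flattenAcc (ts : List PvTree) : ∀ init,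
    ts.foldl (fun out t => pvFlattenAcc t out) init = init ++ pvFlatF ts := by
  induction ts with
  | nil => intro init; simp [pvFlatF]
  | cons t ts ih => intro init; simp [pvFlatF, pvFlattenAcc_eq, List.flatMap]

theorem pvSplit_append (r : Int) : ∀ (a b : List Int),
    pvSplit r (a ++ b) =
      match pvSplit r a with
      | some x => some (x.1, x.2.1, x.2.2 ++ b)
      | none => (pvSplit r b).map (fun x => (a ++ x.1, x.2.1, x.2.2)) := by
  intro a
  induction a with
  | nil => intro b; cases h : pvSplit r b <;> simp [pvSplit, h]
  | cons s tl ih =>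
    intro b
    by_cases hs : r ≤ s
    · simp [pvSplit, hs]
    · simp only [List.cons_append, pvSplit, if_neg hs, ih b]
      cases h : pvSplit r tl with
      | none => cases h2 : pvSplit r b <;> simp
      | some x => simp

theorem pvPlace?_append (r : String × Int × String) : ∀ (a b : List (String × Int × String)),
    pvPlace? r (a ++ b) =
      match pvPlace? r a with
      | some a' => some (a' ++ b)
      | none => (pvPlace? r b).map (a ++ ·) := by
  intro a
  induction a with
  | nil => intro b; cases h : pvPlace? r b <;> simp [pvPlace?, h]
  | cons c tl ih =>
    intro b
    by_cases hs : c.1 = "." ∧ r.2.1 ≤ c.2.1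
    · simp [pvPlace?, hs]
    · simp only [List.cons_append, pvPlace?, if_neg hs, ih b]
      cases h : pvPlace? r tl with
      | none => cases h2 : pvPlace? r b <;> simp
      | some x => simp

theorem pvTree_corr (r : String × Int × String) (t : PvTree) :
    (pvSplit r.2.1 (pvGS t) = none → pvFill? r t = none ∧ pvPlace? r (pvFlat t) = none)
  ∧ (∀ p s q, pvSplit r.2.1 (pvGS t) = some (p, s, q) →
      ∃ t', pvFill? r t = some t' ∧ pvPlace? r (pvFlat t) = some (pvFlat t')
        ∧ pvGS t' = p ++ pvNewSizes r s ++ q) := by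
  induction t with
  | leaf c =>
    constructor
    · intro hnone
      by_cases hd : c.1 = "."
      · simp only [pvGS, if_pos hd] at hnone
        by_cases hle : r.2.1 ≤ c.2.1
        · simp [pvSplit, hle] at hnone
        · exact ⟨by simp [pvFill?, hle], by simp [pvFlat, pvPlace?, hle]⟩
      · exact ⟨by simp [pvFill?, hd], by simp [pvFlat, pvPlace?, hd]⟩
    · intro p s q hsome
      by_cases hd : c.1 = "."
      · simp only [pvGS, if_pos hd] at hsome
        by_cases hle : r.2.1 ≤ c.2.1
        · simp only [pvSplit, if_pos hle, Option.some.injEq, Prod.mk.injEq] at hsome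
          obtain ⟨h1, h2, h3⟩ := hsome
          subst h1; subst h2; subst h3
          by_cases hlt : r.2.1 < c.2.1
          · refine ⟨.node (.leaf r) (.leaf (".", c.2.1 - r.2.1, "?")), ?_, ?_, ?_⟩
            · simp [pvFill?, hd, hle, hlt]
            · simp [pvFlat, pvPlace?, hd, hle, hlt]
            · simp [pvGS, pvNewSizes, hlt]
          · refine ⟨.leaf r, ?_, ?_, ?_⟩
            · simp [pvFill?, hd, hle, hlt]
            · simp [pvFlat, pvPlace?, hd, hle, hlt]
            · simp [pvGS, pvNewSizes, hlt]
        · simp [pvSplit, hle] at hsome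
      · simp [pvGS, hd, pvSplit] at hsome
  | node l t2 ihl ihr =>
    constructor
    · intro hnone
      simp only [pvGS, pvSplit_append] at hnone
      cases hl : pvSplit r.2.1 (pvGS l) with
      | some x => rw [hl] at hnone; simp at hnone
      | none =>
        rw [hl] at hnone
        simp only [Option.map_eq_none_iff] at hnone
        obtain ⟨hfl, hpl⟩ := ihl.1 hl
        obtain ⟨hfr, hpr⟩ := ihr.1 hnone
        refine ⟨by simp [pvFill?, hfl, hfr], ?_⟩
        simp [pvFlat, pvPlace?_append, hpl, hpr]
    · intro p s q hsome
      simp only [pvGS, pvSplit_append] at hsome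
      cases hl : pvSplit r.2.1 (pvGS l) with
      | some x =>
        rw [hl] at hsome
        simp only [Option.some.injEq, Prod.mk.injEq] at hsome
        obtain ⟨h1, h2, h3⟩ := hsome
        subst h1; subst h2; subst h3
        obtain ⟨t', hft, hpt, hgs⟩ := ihl.2 x.1 x.2.1 x.2.2 (by rw [hl])
        refine ⟨.node t' t2, ?_, ?_, ?_⟩
        · simp [pvFill?, hft]
        · simp [pvFlat, pvPlace?_append, hpt]
        · simp [pvGS, hgs, List.append_assoc]
      | none =>
        rw [hl] at hsome
        simp only [Option.map_eq_some_iff] at hsome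
        obtain ⟨y, hy, hyeq⟩ := hsome
        simp only [Prod.mk.injEq] at hyeq
        obtain ⟨h1, h2, h3⟩ := hyeq
        subst h1; subst h2; subst h3
        obtain ⟨hfl, hpl⟩ := ihl.1 hl
        obtain ⟨t', hft, hpt, hgs⟩ := ihr.2 y.1 y.2.1 y.2.2 (by rw [hy])
        refine ⟨.node l t', ?_, ?_, ?_⟩
        · simp [pvFill?, hfl, hft]
        · simp [pvFlat, pvPlace?_append, hpl, hpt]
        · simp [pvGS, hgs, List.append_assoc]

theorem pvPlaceF_flat (r : String × Int × String) : ∀ ts : List PvTree,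
    pvPlace? r (pvFlatF ts) = (pvPlaceF r ts).map pvFlatF := by
  intro ts
  induction ts with
  | nil => simp [pvFlatF, pvPlace?, pvPlaceF]
  | cons t ts ih =>
    have hflat : pvFlatF (t :: ts) = pvFlat t ++ pvFlatF ts := by simp [pvFlatF, List.flatMap]
    rw [hflat, pvPlace?_append]
    cases hsp : pvSplit r.2.1 (pvGS t) with
    | none =>
      obtain ⟨hf, hp⟩ := (pvTree_corr r t).1 hsp
      rw [hp]
      simp only [pvPlaceF, hf, ih]
      cases hpf : pvPlaceF r ts with
      | none => simp
      | some y => simp [pvFlatF, List.flatMap]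
    | some x =>
      obtain ⟨t', hf, hp, -⟩ := (pvTree_corr r t).2 x.1 x.2.1 x.2.2 (by rw [hsp])
      rw [hp]
      simp [pvPlaceF, hf, pvFlatF, List.flatMap]

theorem pvScan_entries (r : String × Int × String) :
    ∀ (sizes : List Int) (i : Int) (forest : List PvTree) (pre tlG : List (Int × Int)),
      pvScanAcc r forest pre ((sizes.map fun s => (i, s)) ++ tlG) =
        match pvSplit r.2.1 sizes with
        | none => pvScanAcc r forest (pre ++ sizes.map fun s => (i, s)) tlG
        | some x =>
          let t := (PySem.List.pyGet? forest i).getD (.leaf ("", 0, ""))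
          (forest.set i.toNat ((pvFill? r t).getD t),
           pre ++ (x.1.map fun s => (i, s)) ++ ((pvNewSizes r x.2.1).map fun s => (i, s))
             ++ (x.2.2.map fun s => (i, s)) ++ tlG) := by
  intro sizes
  induction sizes with
  | nil => intro i forest pre tlG; simp [pvSplit]
  | cons s0 tl ih =>
    intro i forest pre tlG
    simp only [List.map_cons, List.cons_append, pvScanAcc]
    by_cases hf : r.2.1 ≤ s0
    · rw [if_pos hf]
      simp [pvSplit, hf, pvNewSizes, apply_ite (List.map (fun s => (i, s))), List.append_assoc]
    · rw [if_neg hf]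
      rw [ih i forest (pre ++ [(i, s0)]) tlG]
      simp only [pvSplit, if_neg hf]
      cases hsp : pvSplit r.2.1 tl with
      | none => simp [List.append_assoc]
      | some x => simp [List.append_assoc]

theorem set_append_cons (t' : PvTree) : ∀ (pre : List PvTree) (t : PvTree) (ts : List PvTree),
    (pre ++ t :: ts).set pre.length t' = pre ++ t' :: ts := by
  intro pre
  induction pre with
  | nil => intro t ts; simp
  | cons a pre ih => intro t ts; simp [ih]

theorem pvForest_corr (r : String × Int × String) :
    ∀ (ts pre : List PvTree) (preG : List (Int × Int)),
      pvScanAcc r (pre ++ ts) preG (pvGSpec (pre.length : Int) ts) =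
        match pvPlaceF r ts with
        | none => (pre ++ ts, preG ++ pvGSpec (pre.length : Int) ts)
        | some ts' => (pre ++ ts', preG ++ pvGSpec (pre.length : Int) ts') := by
  intro ts
  induction ts with
  | nil => intro pre preG; simp [pvGSpec, pvScanAcc, pvPlaceF]
  | cons t ts ih =>
    intro pre preG
    simp only [pvGSpec]
    rw [pvScan_entries]
    have hget : (PySem.List.pyGet? (pre ++ t :: ts) ((pre.length : Nat) : Int)).getD (.leaf ("", 0, "")) = t := by
      rw [PySem.List.pyGet?_natCast]
      simp
    cases hsp : pvSplit r.2.1 (pvGS t) with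
    | none =>
      obtain ⟨hfl, -⟩ := (pvTree_corr r t).1 hsp
      have h := ih (pre ++ [t]) (preG ++ (pvGS t).map (fun s => ((pre.length : Int), s)))
      simp only [List.length_append, List.length_cons, List.length_nil, List.append_assoc,
        List.singleton_append] at h
      push_cast at h
      rw [h]
      simp only [pvPlaceF, hfl]
      cases hpf : pvPlaceF r ts with
      | none => simp
      | some ts' => simp [pvGSpec]
    | some x =>
      obtain ⟨t', hft, -, hgs⟩ := (pvTree_corr r t).2 x.1 x.2.1 x.2.2 (by rw [hsp])
      simp only [pvPlaceF, hft, hget, Int.toNat_natCast]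
      rw [set_append_cons]
      simp [pvGSpec, hgs, List.append_assoc]

theorem pvFindA_eq_place (need : String × Int × String) :
    ∀ (l pre : List (String × Int × String)),
      pvFindA need (PySem.List.enumerate l (pre.length : Int)) (pre ++ l)
        = pre ++ (pvPlace? need l).getD l := by
  intro l
  induction l with
  | nil => intro pre; simp [pvFindA, pvPlace?, PySem.List.enumerate_nil]
  | cons c tl ih =>
    intro pre
    rw [PySem.List.enumerate_cons]
    simp only [pvFindA, pvPlace?]
    have hto : PySem.List.slice (pre ++ c :: tl) none (some (pre.length : Int)) = pre := by
      rw [PySem.List.slice_to_natCast]; simp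
    have hfrom : PySem.List.slice (pre ++ c :: tl) (some ((pre.length : Int) + 1)) none = tl := by
      have h : ((pre.length : Int) + 1) = ((pre.length + 1 : Nat) : Int) := by push_cast; ring
      rw [h, PySem.List.slice_from_natCast]; simp
    by_cases hd : c.1 = "."
    · by_cases hle : need.2.1 ≤ c.2.1
      · rw [if_pos (show c.1 = "." ∧ 0 ≤ c.2.1 - need.2.1 from ⟨hd, by omega⟩),
            if_pos (show c.1 = "." ∧ need.2.1 ≤ c.2.1 from ⟨hd, hle⟩)]
        by_cases hlt : need.2.1 < c.2.1
        · rw [if_pos (show 0 < c.2.1 - need.2.1 by omega), if_pos hlt, hto, hfrom]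
          simp
          omega
        · rw [if_neg (show ¬ 0 < c.2.1 - need.2.1 by omega), if_neg hlt, hto, hfrom]
          simp
      · rw [if_neg (show ¬ (c.1 = "." ∧ 0 ≤ c.2.1 - need.2.1) by rintro ⟨-, h⟩; omega),
            if_neg (show ¬ (c.1 = "." ∧ need.2.1 ≤ c.2.1) by rintro ⟨-, h⟩; omega)]
        have h := ih (pre ++ [c])
        simp only [List.length_append, List.length_cons, List.length_nil, List.append_assoc,
          List.singleton_append] at h
        push_cast at h
        rw [h]
        cases hp : pvPlace? need tl <;> simp
    · rw [if_neg (show ¬ (c.1 = "." ∧ 0 ≤ c.2.1 - need.2.1) by rintro ⟨h, -⟩; exact hd h),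
          if_neg (show ¬ (c.1 = "." ∧ need.2.1 ≤ c.2.1) by rintro ⟨h, -⟩; exact hd h)]
      have h := ih (pre ++ [c])
      simp only [List.length_append, List.length_cons, List.length_nil, List.append_assoc,
        List.singleton_append] at h
      push_cast at h
      rw [h]
      cases hp : pvPlace? need tl <;> simp

theorem gaps0_spec : ∀ (chuncks : List (String × Int × String)) (i : Int),
    ((PySem.List.enumerate chuncks i).filter (fun p => p.2.1 == ".")).map (fun p => (p.1, p.2.2.1))
      = pvGSpec i (chuncks.map PvTree.leaf) := by
  intro chuncks
  induction chuncks with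
  | nil => intro i; simp [PySem.List.enumerate_nil, pvGSpec]
  | cons c tl ih =>
    intro i
    rw [PySem.List.enumerate_cons]
    by_cases hd : c.1 = "."
    · simp [hd, pvGSpec, pvGS, ih]
    · simp [hd, pvGSpec, pvGS, ih]

theorem flatF_leaves (chuncks : List (String × Int × String)) :
    pvFlatF (chuncks.map PvTree.leaf) = chuncks := by
  induction chuncks with
  | nil => rfl
  | cons c tl ih => simp only [List.map_cons, pvFlatF, List.flatMap_cons, pvFlat] at *; simp [ih]

theorem main_loop : ∀ (res : List (String × Int × String)) (F : List PvTree) (G : List (Int × Int)),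
    G = pvGSpec 0 F →
    (res.foldl (fun (st : List PvTree × List (Int × Int)) r =>
        pvScanB r (PySem.List.enumerate st.2 0) st.1 st.2) (F, G)).2
      = pvGSpec 0 (res.foldl (fun (st : List PvTree × List (Int × Int)) r =>
        pvScanB r (PySem.List.enumerate st.2 0) st.1 st.2) (F, G)).1
    ∧ sort_this_shit (pvFlatF F) res
      = pvFlatF (res.foldl (fun (st : List PvTree × List (Int × Int)) r =>
        pvScanB r (PySem.List.enumerate st.2 0) st.1 st.2) (F, G)).1 := by
  intro res
  induction res with
  | nil =>
    intro F G hG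
    exact ⟨hG, by simp [sort_this_shit]⟩
  | cons r tl ih =>
    intro F G hG
    subst hG
    simp only [List.foldl_cons]
    have h0 := pvScanB_eq_acc r (pvGSpec 0 F) [] F
    simp only [List.length_nil, Nat.cast_zero, List.nil_append] at h0
    have h1 := pvForest_corr r F [] []
    simp only [List.length_nil, Nat.cast_zero, List.nil_append] at h1
    have hA : sort_this_shit (pvFlatF F) (r :: tl)
        = sort_this_shit ((pvPlace? r (pvFlatF F)).getD (pvFlatF F)) tl := by
      rw [sort_this_shit]
      have h2 := pvFindA_eq_place r (pvFlatF F) []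
      simp only [List.length_nil, Nat.cast_zero, List.nil_append] at h2
      rw [h2]
    rw [h0, h1, hA, pvPlaceF_flat]
    cases hpf : pvPlaceF r F with
    | none => simpa using ih F (pvGSpec 0 F) rfl
    | some F' => simpa using ih F' (pvGSpec 0 F') rfl

-- ===== VERDICT (by name: the statement is the Claim_ definition above) =====
theorem sort_this_shit_spec : Claim_equal_sort_this_shit := by
  intro chuncks residuals _
  unfold Spec_sort_this_shit sort_this_shit_alt
  have h := main_loop residuals (chuncks.map PvTree.leaf)
    (((PySem.List.enumerate chuncks 0).filter (fun p => p.2.1 == ".")).map (fun p => (p.1, p.2.2.1)))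
    (by simpa using gaps0_spec chuncks 0)
  rw [flatF_leaves] at h
  simp only [foldl_flattenAcc, List.nil_append]
  exact h.2
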